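-- pv_equiv track=rewrite | github.com/JonathanHeyno/company-clusterer | cc_backend/clusterer/utils.py | replace_field_names_with_values
-- ===== SOURCE A (Python) =====
-- def replace_field_names_with_values(dimension, company):
--     dimension = ''.join(dimension.split())
--     chars_to_skip = '+-*/^()0123456789.,'
--     new_expression = ''
--     field_name = ''
--     for char in dimension:
--         if char in chars_to_skip:
--             if field_name:
--                 new_expression += '(' + str(company[field_name]) + ')'
--             field_name = ''
--             new_expression += char
--         else:
--             field_name += char
--     if field_name:
--         new_expression += '(' + str(company[field_name]) + ')'
--     return new_expression
-- ===== SOURCE B (Python) =====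
-- def replace_field_names_with_values(dimension, company):
--     skip = '+-*/^()0123456789.,'
--
--     def leading_run(s):
--         # longest prefix of s with no delimiter char, plus the remainder
--         for i, ch in enumerate(s):
--             if ch in skip:
--                 return s[:i], s[i:]
--         return s, ''
--
--     rest = ''.join(dimension.split())
--     parts = []
--     while rest:
--         ch = rest[0]
--         rest = rest[1:]
--         if ch in skip:
--             parts.append(ch)
--         else:
--             run, rest = leading_run(rest)
--             parts.append('(' + str(company[ch + run]) + ')')
--     return ''.join(parts)
-- ===== Notes on version B (the rewrite author's own statement) =====
-- stated objective: alternative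
-- what changed: Replaces A's per-character state machine with field_name/new_expression string accumulators by a run-based scan: each maximal non-delimiter run is taken in one inner pass (leading_run) and substituted as a whole, so there is no carried field_name state.
import Mathlib
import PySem

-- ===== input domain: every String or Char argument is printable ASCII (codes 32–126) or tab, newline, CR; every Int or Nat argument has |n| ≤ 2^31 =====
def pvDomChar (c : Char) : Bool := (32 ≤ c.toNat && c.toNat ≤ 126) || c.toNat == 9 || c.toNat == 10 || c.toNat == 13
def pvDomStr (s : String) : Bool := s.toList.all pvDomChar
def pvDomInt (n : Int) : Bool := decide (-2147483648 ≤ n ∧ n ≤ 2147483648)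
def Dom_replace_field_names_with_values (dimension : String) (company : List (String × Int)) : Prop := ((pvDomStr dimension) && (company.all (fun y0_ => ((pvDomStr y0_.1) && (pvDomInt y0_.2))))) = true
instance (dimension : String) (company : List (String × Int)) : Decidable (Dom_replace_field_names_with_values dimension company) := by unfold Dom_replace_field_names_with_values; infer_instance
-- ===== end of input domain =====

-- B replaces A's per-character state machine (field_name accumulator) by a run-based scan that
-- substitutes each maximal non-delimiter run in one inner pass; alternative decomposition, same cost.

-- shared helpers: the delimiter set, dict lookup (first match, exact for a Python dict),
-- and the rendering '(' + str(company[name]) + ')' (default 0 is unreachable under Pre_).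
def pvSkip : List Char := "+-*/^()0123456789.,".toList

def pvLookup : List (String × Int) → String → Option Int
  | [], _ => none
  | (k, v) :: rest, key => if k = key then some v else pvLookup rest key

def pvToken (company : List (String × Int)) (fn : List Char) : List Char :=
  '(' :: (PySem.Int.toStr ((pvLookup company (String.mk fn)).getD 0)).toList ++ [')']

-- ===== PORT A =====
-- per-character loop carrying (new_expression, field_name)
def replace_field_names_with_values (dimension : String) (company : List (String × Int)) : String :=
  let s := PySem.Str.join "" (PySem.Str.split₀ dimension)
  let st := s.toList.foldl
    (fun (st : List Char × List Char) c =>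
      if pvSkip.contains c then
        ((if st.2 ≠ [] then st.1 ++ pvToken company st.2 else st.1) ++ [c], [])
      else (st.1, st.2 ++ [c]))
    ([], [])
  String.mk (if st.2 ≠ [] then st.1 ++ pvToken company st.2 else st.1)

-- ===== PORT B =====
-- leading_run s = longest delimiter-free prefix of s, plus the remainder
def pvLeadingRun : List Char → List Char × List Char
  | [] => ([], [])
  | c :: rest =>
    if pvSkip.contains c then ([], c :: rest)
    else (c :: (pvLeadingRun rest).1, (pvLeadingRun rest).2)

theorem pvLeadingRun_len (s : List Char) : (pvLeadingRun s).2.length ≤ s.length := by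
  induction s with
  | nil => simp [pvLeadingRun]
  | cons c rest ih =>
    by_cases h : c ∈ pvSkip <;> simp [pvLeadingRun, h] <;> omega

-- the while loop over the remaining string
def pvAltLoop (company : List (String × Int)) : List Char → List Char
  | [] => []
  | c :: rest =>
    if pvSkip.contains c then c :: pvAltLoop company rest
    else pvToken company (c :: (pvLeadingRun rest).1) ++ pvAltLoop company (pvLeadingRun rest).2
termination_by l => l.length
decreasing_by
  · simp
  · have := pvLeadingRun_len rest; simp; omega

def replace_field_names_with_values_alt (dimension : String) (company : List (String × Int)) : String :=
  String.mk (pvAltLoop company (PySem.Str.join "" (PySem.Str.split₀ dimension)).toList)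

-- ===== PRECONDITION & SPEC =====
-- tokenizer used only to state Pre_: the field names of the whitespace-stripped expression
def pvFieldsAux : List Char → List Char → List String
  | fn, [] => if fn.isEmpty then [] else [String.mk fn.reverse]
  | fn, c :: rest =>
    if pvSkip.contains c then
      (if fn.isEmpty then pvFieldsAux [] rest else String.mk fn.reverse :: pvFieldsAux [] rest)
    else pvFieldsAux (c :: fn) rest

-- Pre_ excludes exactly the inputs where Python A raises KeyError: a field name of the
-- stripped expression that is not a key of company (B raises KeyError there too).
def Pre_replace_field_names_with_values (dimension : String) (company : List (String × Int)) : Prop :=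
  ((pvFieldsAux [] (PySem.Str.join "" (PySem.Str.split₀ dimension)).toList).all
    (fun f => (pvLookup company f).isSome)) = true

instance (dimension : String) (company : List (String × Int)) : Decidable (Pre_replace_field_names_with_values dimension company) := by
  unfold Pre_replace_field_names_with_values; infer_instance

def pvWitness_replace_field_names_with_values : String × (List (String × Int)) :=
  ("price + tax*2", [("price", 10), ("tax", 3)])

def Spec_replace_field_names_with_values (dimension : String) (company : List (String × Int)) (out : String) : Prop := out = replace_field_names_with_values_alt dimension company
instance (dimension : String) (company : List (String × Int)) (out : String) : Decidable (Spec_replace_field_names_with_values dimension company out) := by unfold Spec_replace_field_names_with_values; infer_instance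

-- ===== CLAIM (what is proved, stated in full; the proofs are below) =====
def Claim_equal_replace_field_names_with_values : Prop := ∀ (dimension : String) (company : List (String × Int)), Dom_replace_field_names_with_values dimension company → Pre_replace_field_names_with_values dimension company → Spec_replace_field_names_with_values dimension company (replace_field_names_with_values dimension company)

-- ===== LEMMAS AND PROOFS =====

def pvStepA (company : List (String × Int)) (st : List Char × List Char) (c : Char) : List Char × List Char :=
  if pvSkip.contains c then
    ((if st.2 ≠ [] then st.1 ++ pvToken company st.2 else st.1) ++ [c], [])
  else (st.1, st.2 ++ [c])

def pvFinish (company : List (String × Int)) (st : List Char × List Char) : List Char :=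
  if st.2 ≠ [] then st.1 ++ pvToken company st.2 else st.1

theorem pvLeadingRun_cons_pos {c : Char} (rest : List Char) (h : c ∈ pvSkip) :
    pvLeadingRun (c :: rest) = ([], c :: rest) := by
  simp [pvLeadingRun, h]

theorem pvLeadingRun_cons_neg {c : Char} (rest : List Char) (h : c ∉ pvSkip) :
    pvLeadingRun (c :: rest) = (c :: (pvLeadingRun rest).1, (pvLeadingRun rest).2) := by
  simp [pvLeadingRun, h]

theorem pvAltLoop_cons_pos (company : List (String × Int)) {c : Char} (rest : List Char)
    (h : c ∈ pvSkip) : pvAltLoop company (c :: rest) = c :: pvAltLoop company rest := by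
  rw [pvAltLoop]; simp [h]

theorem pvAltLoop_cons_neg (company : List (String × Int)) {c : Char} (rest : List Char)
    (h : c ∉ pvSkip) : pvAltLoop company (c :: rest) =
      pvToken company (c :: (pvLeadingRun rest).1) ++ pvAltLoop company (pvLeadingRun rest).2 := by
  rw [pvAltLoop]; simp [h]

theorem pvStepA_pos (company : List (String × Int)) {c : Char} (st : List Char × List Char)
    (h : c ∈ pvSkip) : pvStepA company st c =
      ((if st.2 ≠ [] then st.1 ++ pvToken company st.2 else st.1) ++ [c], []) := by
  simp [pvStepA, h]

theorem pvStepA_neg (company : List (String × Int)) {c : Char} (st : List Char × List Char)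
    (h : c ∉ pvSkip) : pvStepA company st c = (st.1, st.2 ++ [c]) := by
  simp [pvStepA, h]

theorem pvLeadingRun_snd (s : List Char) :
    (pvLeadingRun s).2 = [] ∨ ∃ d t, (pvLeadingRun s).2 = d :: t ∧ d ∈ pvSkip := by
  induction s with
  | nil => left; simp [pvLeadingRun]
  | cons c rest ih =>
    by_cases h : c ∈ pvSkip
    · right; exact ⟨c, rest, by rw [pvLeadingRun_cons_pos rest h], h⟩
    · rw [pvLeadingRun_cons_neg rest h]; exact ih

theorem pvRun (company : List (String × Int)) (L : List Char) :
    ∀ fn acc, L.foldl (pvStepA company) (acc, fn) =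
      (pvLeadingRun L).2.foldl (pvStepA company) (acc, fn ++ (pvLeadingRun L).1) := by
  induction L with
  | nil => intro fn acc; simp [pvLeadingRun]
  | cons c rest ih =>
    intro fn acc
    by_cases h : c ∈ pvSkip
    · rw [pvLeadingRun_cons_pos rest h]; simp
    · rw [pvLeadingRun_cons_neg rest h]
      simp only [List.foldl_cons]
      rw [pvStepA_neg company _ h, ih]
      simp

theorem pvMain (company : List (String × Int)) :
    ∀ (n : Nat) (L : List Char), L.length ≤ n → ∀ acc,
      pvFinish company (L.foldl (pvStepA company) (acc, []) ) = acc ++ pvAltLoop company L := by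
  intro n
  induction n with
  | zero =>
    intro L hL acc
    have : L = [] := List.eq_nil_of_length_eq_zero (Nat.le_zero.mp hL)
    subst this; simp [pvFinish, pvAltLoop]
  | succ n ih =>
    intro L hL acc
    match L with
    | [] => simp [pvFinish, pvAltLoop]
    | c :: rest =>
      have hrest : rest.length ≤ n := by simpa using hL
      by_cases h : c ∈ pvSkip
      · rw [List.foldl_cons, pvStepA_pos company _ h]
        simp only [ne_eq, not_true_eq_false, if_neg, reduceIte]
        rw [ih rest hrest (acc ++ [c]), pvAltLoop_cons_pos company rest h]
        simp
      · rw [List.foldl_cons, pvStepA_neg company _ h]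
        simp only []
        rw [pvRun company rest, pvAltLoop_cons_neg company rest h]
        rcases pvLeadingRun_snd rest with h2 | ⟨d, t, h2, hd⟩
        · rw [h2]
          simp only [List.foldl_nil, h2, pvFinish]
          simp [pvAltLoop]
        · rw [h2, List.foldl_cons, pvStepA_pos company _ hd]
          simp only [List.nil_append]
          have ht : t.length ≤ n := by
            have := pvLeadingRun_len rest
            rw [h2] at this; simp at this; omega
          have hne : ([c] ++ (pvLeadingRun rest).1 : List Char) ≠ [] := by simp
          rw [if_pos hne, ih t ht _]
          rw [pvAltLoop_cons_pos company t hd]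
          simp

-- ===== VERDICT (by name: the statement is the Claim_ definition above) =====
theorem replace_field_names_with_values_spec : Claim_equal_replace_field_names_with_values := by
  intro dimension company _ _
  unfold Spec_replace_field_names_with_values
  unfold replace_field_names_with_values replace_field_names_with_values_alt
  have := pvMain company
    (PySem.Str.join "" (PySem.Str.split₀ dimension)).toList.length
    (PySem.Str.join "" (PySem.Str.split₀ dimension)).toList (le_refl _) []
  simp only [pvFinish, List.nil_append] at this
  exact congrArg String.mk this
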